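-- pv_equiv track=rewrite | github.com/thumbe12856/competitive-programming | AA/L1/Pleasant_Pairs/solve.py | solve
-- ===== SOURCE A (Python) =====
-- def solve(N, nums):
--     ans = 0
--     for j in range(1, N, 1):
--         # nums[i] * nums[j] = i + 1 + j + 1
--         ni = 1
--         while True:
--             i = ni * nums[j] - j - 2
--             if i >= j:
--                 break
--             elif 0 <= i < j:
--                 if nums[i] == ni:
--                     ans += 1
--             ni += 1
--
--     return ans
-- ===== SOURCE B (Python) =====
-- def solve(N, nums):
--     # Count pairs i < j (with j < N) such that nums[i] * nums[j] == i + j + 2,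
--     # by a direct scan over all pairs in one comprehension.
--     return sum(
--         1
--         for j in range(1, N)
--         for i in range(j)
--         if nums[i] * nums[j] == i + j + 2
--     )
-- ===== Notes on version B (the rewrite author's own statement) =====
-- stated objective: simpler
-- what changed: B counts the qualifying pairs by a direct one-comprehension scan over all i<j, instead of A's inner while-loop that enumerates candidate values ni and jumps to i = ni*nums[j]-j-2 with an early break; Pre_ excludes the inputs where A never returns (it loops forever when some nums[j] <= 0 for 1<=j<N, and raises IndexError when N exceeds len(nums)).
import Mathlib
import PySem

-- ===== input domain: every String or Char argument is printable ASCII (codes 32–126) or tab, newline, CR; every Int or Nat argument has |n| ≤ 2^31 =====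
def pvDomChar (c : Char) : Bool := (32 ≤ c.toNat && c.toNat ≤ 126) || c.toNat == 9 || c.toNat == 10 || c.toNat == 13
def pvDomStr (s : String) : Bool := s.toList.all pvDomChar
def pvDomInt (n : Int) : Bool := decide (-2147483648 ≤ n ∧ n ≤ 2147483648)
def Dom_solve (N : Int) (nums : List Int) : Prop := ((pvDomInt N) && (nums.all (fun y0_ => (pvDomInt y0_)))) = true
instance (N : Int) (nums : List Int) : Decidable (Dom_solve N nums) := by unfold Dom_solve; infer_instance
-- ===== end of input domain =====

-- B replaces A's inner while-loop (stepping through candidate values ni with an early break)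
-- by a plain scan over all i < j; equivalence on Pre_ (A's return domain) is proved below.

-- ===== PORT A =====
-- A's 'while True' loop, driven by a fuel counter: under Pre_solve (nums[j] ≥ 1) the break
-- 'i >= j' fires within 2*j+2 iterations, so fuel (2*j+3).toNat is never exhausted there;
-- outside Pre_solve the Python loop never returns (excluded by Pre_solve).
def solveInner (nums : List Int) (j : Int) : Nat → Int → Int → Int
  | 0, _, ans => ans
  | fuel+1, ni, ans =>
    let i := ni * PySem.List.pyGetD nums j 0 - j - 2
    if j ≤ i then ans
    else if 0 ≤ i ∧ i < j then
      (if PySem.List.pyGetD nums i 0 = ni then solveInner nums j fuel (ni+1) (ans+1)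
       else solveInner nums j fuel (ni+1) ans)
    else solveInner nums j fuel (ni+1) ans

def solve (N : Int) (nums : List Int) : Int :=
  (PySem.List.pyRange 1 N 1).foldl (fun ans j => solveInner nums j (2*j+3).toNat 1 ans) 0

-- ===== PORT B =====
def solve_alt (N : Int) (nums : List Int) : Int :=
  ((PySem.List.pyRange 1 N 1).map (fun j =>
    (((PySem.List.pyRange 0 j 1).countP (fun i =>
        PySem.List.pyGetD nums i 0 * PySem.List.pyGetD nums j 0 == i + j + 2)) : Int))).sum

-- ===== PRECONDITION & SPEC =====
-- Pre_solve is exactly A's return domain: A raises IndexError when some j in range(1,N) is ≥ len(nums),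
-- and loops forever when some nums[j] ≤ 0 for j in range(1,N).
def Pre_solve (N : Int) (nums : List Int) : Prop :=
  N ≤ 1 ∨ (N ≤ (nums.length : Int) ∧ ∀ x ∈ (nums.take N.toNat).drop 1, 1 ≤ x)
instance (N : Int) (nums : List Int) : Decidable (Pre_solve N nums) := by unfold Pre_solve; infer_instance

def pvWitness_solve : Int × List Int := (3, [2, 1, 1])

def Spec_solve (N : Int) (nums : List Int) (out : Int) : Prop := out = solve_alt N nums
instance (N : Int) (nums : List Int) (out : Int) : Decidable (Spec_solve N nums out) := by unfold Spec_solve; infer_instance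

-- ===== CLAIM (what is proved, stated in full; the proofs are below) =====
def Claim_equal_solve : Prop := ∀ (N : Int) (nums : List Int), Dom_solve N nums → Pre_solve N nums → Spec_solve N nums (solve N nums)

-- ===== LEMMAS AND PROOFS =====

-- counting a disjoint disjunction of predicates splits
theorem pv_countP_split {α : Type} (l : List α) (p q r : α → Bool)
    (h : ∀ x ∈ l, p x = (q x || r x) ∧ (q x && r x) = false) :
    l.countP p = l.countP q + l.countP r := by
  induction l with
  | nil => simp
  | cons a t ih =>
    have ha := h a (by simp)
    have ht : ∀ x ∈ t, p x = (q x || r x) ∧ (q x && r x) = false :=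
      fun x hx => h x (by simp [hx])
    simp only [List.countP_cons, ih ht]
    rcases ha with ⟨h1, h2⟩
    cases hq : q a <;> cases hr : r a <;> simp [h1, hq, hr] at * <;> omega

-- a predicate that holds at most at one point counts 0 or 1 on a nodup list
theorem pv_countP_unique (l : List Int) (r : Int → Bool) (a : Int) (hnd : l.Nodup)
    (h : ∀ x ∈ l, r x = true → x = a) :
    l.countP r = if a ∈ l ∧ r a = true then 1 else 0 := by
  induction l with
  | nil => simp
  | cons b t ih =>
    have hnd' := (List.nodup_cons.mp hnd).2
    have hb : b ∉ t := (List.nodup_cons.mp hnd).1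
    have ht : ∀ x ∈ t, r x = true → x = a := fun x hx => h x (by simp [hx])
    simp only [List.countP_cons, ih hnd' ht]
    by_cases hrb : r b = true
    · have hba : b = a := h b (by simp) hrb
      subst hba
      have hna : b ∉ t := hb
      simp [hrb, hna]
    · have hrb' : r b = false := by simpa using hrb
      by_cases hat : a ∈ t
      · have : ¬ b = a := fun e => (e ▸ hb) hat
        simp [hrb', hat]

      · have hcond : ¬ (a ∈ b :: t ∧ r a = true) := by
          intro hc
          rcases List.mem_cons.mp hc.1 with he | he
          · subst he; exact hrb hc.2
          · exact hat he
        simp [hrb', hat]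
        intro e
        subst e
        exact hrb'

-- A's inner loop, from candidate value ni with enough fuel, adds the number of
-- indices i < j with nums[i]*nums[j] = i+j+2 and nums[i] ≥ ni.
theorem pv_inner_eq (nums : List Int) (j : Int)
    (hnj : 1 ≤ PySem.List.pyGetD nums j 0) :
    ∀ (fuel : Nat) (ni ans : Int), 1 ≤ ni → 2*j + 3 ≤ ni + fuel →
    solveInner nums j fuel ni ans
      = ans + ((PySem.List.pyRange 0 j 1).countP (fun i =>
          (PySem.List.pyGetD nums i 0 * PySem.List.pyGetD nums j 0 == i + j + 2)
          && decide (ni ≤ PySem.List.pyGetD nums i 0)) : Int) := by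
  set nj := PySem.List.pyGetD nums j 0 with hnjdef
  intro fuel
  induction fuel with
  | zero =>
    intro ni ans hni hfuel
    have hz : (PySem.List.pyRange 0 j 1).countP (fun i =>
        (PySem.List.pyGetD nums i 0 * nj == i + j + 2)
        && decide (ni ≤ PySem.List.pyGetD nums i 0)) = 0 := by
      apply List.countP_eq_zero.mpr
      intro i hi
      have hir := (PySem.List.mem_pyRange_one).mp hi
      simp only [Bool.and_eq_true, beq_iff_eq, decide_eq_true_eq, not_and]
      intro heq hge
      have h1 : ni * nj ≤ PySem.List.pyGetD nums i 0 * nj :=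
        mul_le_mul_of_nonneg_right hge (by omega)
      have h2 : ni ≤ ni * nj := le_mul_of_one_le_right (by omega) hnj
      simp at hfuel
      omega
    simp [solveInner, hz]
  | succ f ih =>
    intro ni ans hni hfuel
    simp only [solveInner, ← hnjdef]
    set i0 := ni * nj - j - 2 with hi0
    by_cases hbr : j ≤ i0
    · -- break: everything remaining would land at index ≥ j
      have hz : (PySem.List.pyRange 0 j 1).countP (fun i =>
          (PySem.List.pyGetD nums i 0 * nj == i + j + 2)
          && decide (ni ≤ PySem.List.pyGetD nums i 0)) = 0 := by
        apply List.countP_eq_zero.mpr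
        intro i hi
        have hir := (PySem.List.mem_pyRange_one).mp hi
        simp only [Bool.and_eq_true, beq_iff_eq, decide_eq_true_eq, not_and]
        intro heq hge
        have h1 : ni * nj ≤ PySem.List.pyGetD nums i 0 * nj :=
          mul_le_mul_of_nonneg_right hge (by omega)
        omega
      simp [hbr, hz]
    · -- step: split the count at value ni
      have hsplit : (PySem.List.pyRange 0 j 1).countP (fun i =>
            (PySem.List.pyGetD nums i 0 * nj == i + j + 2)
            && decide (ni ≤ PySem.List.pyGetD nums i 0))
          = (PySem.List.pyRange 0 j 1).countP (fun i =>
            (PySem.List.pyGetD nums i 0 * nj == i + j + 2)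
            && decide (ni + 1 ≤ PySem.List.pyGetD nums i 0))
          + (PySem.List.pyRange 0 j 1).countP (fun i =>
            (PySem.List.pyGetD nums i 0 * nj == i + j + 2)
            && (PySem.List.pyGetD nums i 0 == ni)) := by
        apply pv_countP_split
        intro x hx
        constructor
        · rw [Bool.eq_iff_iff]
          simp only [Bool.and_eq_true, Bool.or_eq_true, beq_iff_eq, decide_eq_true_eq]
          constructor
          · rintro ⟨hb, hge⟩
            by_cases h1 : PySem.List.pyGetD nums x 0 = ni
            · exact Or.inr ⟨hb, h1⟩
            · exact Or.inl ⟨hb, by omega⟩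
          · rintro (⟨hb, hge⟩ | ⟨hb, he⟩)
            · exact ⟨hb, by omega⟩
            · exact ⟨hb, by omega⟩
        · by_cases h1 : PySem.List.pyGetD nums x 0 = ni
          · have h2 : ¬ (ni + 1 ≤ PySem.List.pyGetD nums x 0) := by omega
            simp [h2]
          · simp [h1]
      have huniq : (PySem.List.pyRange 0 j 1).countP (fun i =>
            (PySem.List.pyGetD nums i 0 * nj == i + j + 2)
            && (PySem.List.pyGetD nums i 0 == ni))
          = if i0 ∈ PySem.List.pyRange 0 j 1 ∧
              ((PySem.List.pyGetD nums i0 0 * nj == i0 + j + 2)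
               && (PySem.List.pyGetD nums i0 0 == ni)) = true then 1 else 0 := by
        apply pv_countP_unique _ _ _ (PySem.List.nodup_pyRange_one 0 j)
        intro x hx hr
        simp only [Bool.and_eq_true, beq_iff_eq] at hr
        have hxx : ni * nj = x + j + 2 := by rw [← hr.2]; exact hr.1
        omega
      have hrec : ∀ a : Int, solveInner nums j f (ni+1) a
          = a + ((PySem.List.pyRange 0 j 1).countP (fun i =>
              (PySem.List.pyGetD nums i 0 * nj == i + j + 2)
              && decide (ni + 1 ≤ PySem.List.pyGetD nums i 0)) : Int) := by
        intro a; exact ih (ni+1) a (by omega) (by push_cast at hfuel ⊢; omega)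
      by_cases hin : 0 ≤ i0 ∧ i0 < j
      · by_cases hv : PySem.List.pyGetD nums i0 0 = ni
        · have hmem : i0 ∈ PySem.List.pyRange 0 j 1 :=
            (PySem.List.mem_pyRange_one).mpr ⟨hin.1, hin.2⟩
          simp [hbr, hin, hv, hrec, hsplit, huniq, hmem]
          omega
        · simp [hbr, hin, hv, hrec, hsplit, huniq]
      · -- i0 < 0 here (since ¬ j ≤ i0): i0 is outside range(j), nothing is counted at value ni
        have hnmem : i0 ∉ PySem.List.pyRange 0 j 1 := by
          intro h
          have := (PySem.List.mem_pyRange_one).mp h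
          omega
        simp [hbr, hin, hrec, hsplit, huniq, hnmem]

-- with ni = 1, the extra conjunct nums[i] ≥ 1 is implied by the equation itself
theorem pv_count_one (nums : List Int) (j : Int) (hj : 1 ≤ j)
    (hnj : 1 ≤ PySem.List.pyGetD nums j 0) :
    (PySem.List.pyRange 0 j 1).countP (fun i =>
        (PySem.List.pyGetD nums i 0 * PySem.List.pyGetD nums j 0 == i + j + 2)
        && decide ((1:Int) ≤ PySem.List.pyGetD nums i 0))
      = (PySem.List.pyRange 0 j 1).countP (fun i =>
        PySem.List.pyGetD nums i 0 * PySem.List.pyGetD nums j 0 == i + j + 2) := by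
  apply List.countP_congr
  intro x hx
  have hir := (PySem.List.mem_pyRange_one).mp hx
  by_cases hb : PySem.List.pyGetD nums x 0 * PySem.List.pyGetD nums j 0 = x + j + 2
  · have hpos : 1 ≤ PySem.List.pyGetD nums x 0 := by
      by_contra hneg
      rw [not_le] at hneg
      have : PySem.List.pyGetD nums x 0 * PySem.List.pyGetD nums j 0 ≤ 0 :=
        mul_nonpos_of_nonpos_of_nonneg (by omega) (by omega)
      omega
    simp [hb, hpos]
  · simp [hb]

-- ===== VERDICT (by name: the statement is the Claim_ definition above) =====
theorem solve_spec : Claim_equal_solve := by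
  intro N nums _ hpre
  have hpre' : ∀ j ∈ PySem.List.pyRange 1 N 1, 1 ≤ PySem.List.pyGetD nums j 0 := by
    intro j hjmem
    have hjr := (PySem.List.mem_pyRange_one).mp hjmem
    rcases hpre with hN1 | ⟨hNlen, hall⟩
    · omega
    · have hjlen : j < (nums.length : Int) := by omega
      have hlt : j.toNat - 1 < ((nums.take N.toNat).drop 1).length := by
        simp [List.length_take]
        omega
      have heq : ((nums.take N.toNat).drop 1)[j.toNat - 1]'hlt = nums[j.toNat]'(by omega) := by
        rw [List.getElem_drop, List.getElem_take]
        congr 1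
        omega
      have hmem : nums[j.toNat]'(by omega) ∈ (nums.take N.toNat).drop 1 :=
        heq ▸ List.getElem_mem hlt
      have := hall _ hmem
      rwa [PySem.List.pyGetD_eq_getElem nums 0 (by omega) hjlen]
  unfold Spec_solve solve solve_alt
  rw [PySem.List.foldl_congr_mem
      (g := fun ans j => ans + ((PySem.List.pyRange 0 j 1).countP (fun i =>
        PySem.List.pyGetD nums i 0 * PySem.List.pyGetD nums j 0 == i + j + 2) : Int))]
  · rw [PySem.List.foldl_add]
    simp
  · intro acc j hjmem
    have hjr := (PySem.List.mem_pyRange_one).mp hjmem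
    have hpj := hpre' j hjmem
    have hfuel : (2*j + 3 : Int) ≤ 1 + ((2*j+3).toNat : Int) := by
      rw [Int.toNat_of_nonneg (by omega)]; omega
    rw [pv_inner_eq nums j hpj ((2*j+3).toNat) 1 acc le_rfl hfuel,
        pv_count_one nums j hjr.1 hpj]
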